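-- pv_equiv track=rewrite | github.com/lkzfox/lotofacil | v2/libs/helper.py | todasSequenciasPulos
-- ===== SOURCE A (Python) =====
-- def todasSequenciasPulos(numeros):
-- 	chave = ''
-- 	todas = []
-- 	tamanho_sequencia = 0
-- 	for n in range(len(numeros) - 1):
-- 		diferenca = numeros[n+1] - numeros[n]
-- 		if (numeros[n] + 1 == numeros[n+1]):
-- 			tamanho_sequencia += 1
-- 		elif tamanho_sequencia > 0:
-- 			chave += 'S' + str(tamanho_sequencia+1) + 'P' + str(diferenca)
-- 			tamanho_sequencia = 0
-- 			todas.append(chave)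
-- 			chave = ''
-- 		else:
-- 			tamanho_sequencia = 0
--
-- 	if tamanho_sequencia > 0:
-- 		chave += 'S' + str(tamanho_sequencia+1)
-- 		todas.append(chave)
--
-- 	return todas
-- ===== SOURCE B (Python) =====
-- def todasSequenciasPulos(numeros):
--     # two-pass: materialize the adjacent differences, then scan them grouping
--     # maximal runs of 1-differences; each run of r ones becomes 'S{r+1}', with
--     # 'P{gap}' appended when a non-consecutive difference follows the run.
--     diffs = [numeros[i + 1] - numeros[i] for i in range(len(numeros) - 1)]
--     n = len(diffs)
--     out = []
--     i = 0
--     while i < n: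
--         if diffs[i] != 1:
--             i += 1
--             continue
--         j = i
--         while j < n and diffs[j] == 1:
--             j += 1
--         if j < n:
--             out.append('S' + str(j - i + 1) + 'P' + str(diffs[j]))
--         else:
--             out.append('S' + str(j - i + 1))
--         i = j + 1
--     return out
-- ===== Notes on version B (the rewrite author's own statement) =====
-- stated objective: alternative
-- what changed: A threads a flat stateful accumulator (current run length + pending key string) through one pass over adjacent pairs; B first materializes the list of adjacent differences and then scans it grouping maximal runs of 1-differences with an inner skip loop, emitting one string per run.
import Mathlib
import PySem

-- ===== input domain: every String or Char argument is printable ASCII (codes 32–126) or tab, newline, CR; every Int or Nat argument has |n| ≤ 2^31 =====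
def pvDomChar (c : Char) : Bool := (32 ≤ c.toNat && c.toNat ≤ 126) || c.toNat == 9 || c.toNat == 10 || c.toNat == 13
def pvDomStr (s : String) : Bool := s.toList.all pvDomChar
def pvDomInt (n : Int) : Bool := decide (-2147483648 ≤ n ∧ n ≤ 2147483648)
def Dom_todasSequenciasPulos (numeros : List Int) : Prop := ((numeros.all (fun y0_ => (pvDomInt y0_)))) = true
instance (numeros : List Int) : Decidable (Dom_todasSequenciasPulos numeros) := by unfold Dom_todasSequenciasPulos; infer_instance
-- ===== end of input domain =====

-- B replaces A's flat stateful accumulator pass with a two-pass shape: build the list of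
-- adjacent differences, then scan it grouping maximal runs of 1-differences (objective: alternative).


-- ===== PORT A =====
-- loop body of A: state is (chave, todas, tamanho_sequencia)
def stepA (numeros : List Int) (s : String × List String × Int) (n : Int) : String × List String × Int :=
  let diferenca := PySem.List.pyGetD numeros (n + 1) 0 - PySem.List.pyGetD numeros n 0
  if PySem.List.pyGetD numeros n 0 + 1 = PySem.List.pyGetD numeros (n + 1) 0 then
    (s.1, s.2.1, s.2.2 + 1)
  else if s.2.2 > 0 then
    ("", s.2.1 ++ [s.1 ++ ("S" ++ PySem.Int.toStr (s.2.2 + 1) ++ "P" ++ PySem.Int.toStr diferenca)], 0)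
  else
    (s.1, s.2.1, 0)

def todasSequenciasPulos (numeros : List Int) : List String :=
  let fin := (PySem.List.pyRange 0 (PySem.List.len numeros - 1) 1).foldl (stepA numeros) ("", [], 0)
  if fin.2.2 > 0 then fin.2.1 ++ [fin.1 ++ ("S" ++ PySem.Int.toStr (fin.2.2 + 1))] else fin.2.1

-- ===== PORT B =====
-- inner while loop of B: advance j past the 1-differences
def bScan (diffs : List Int) (j : Nat) : Nat :=
  if h : j < diffs.length ∧ diffs.getD j 0 = 1 then bScan diffs (j + 1) else j
  termination_by diffs.length - j
  decreasing_by omega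

-- needed by bLoop's termination proof
theorem bScan_ge (diffs : List Int) (j : Nat) : j ≤ bScan diffs j := by
  fun_induction bScan diffs j with
  | case1 j h ih => omega
  | case2 j h => omega

-- outer while loop of B
def bLoop (diffs : List Int) (i : Nat) (out : List String) : List String :=
  if _hi : i < diffs.length then
    if diffs.getD i 0 ≠ 1 then bLoop diffs (i + 1) out
    else
      let j := bScan diffs i
      if _hj : j < diffs.length then
        bLoop diffs (j + 1)
          (out ++ ["S" ++ PySem.Int.toStr ((j : Int) - (i : Int) + 1) ++ "P" ++ PySem.Int.toStr (diffs.getD j 0)])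
      else
        out ++ ["S" ++ PySem.Int.toStr ((j : Int) - (i : Int) + 1)]
  else out
  termination_by diffs.length - i
  decreasing_by
  · omega
  · have := bScan_ge diffs i; omega

def todasSequenciasPulos_alt (numeros : List Int) : List String :=
  let diffs := (PySem.List.pyRange 0 (PySem.List.len numeros - 1) 1).map
    (fun i => PySem.List.pyGetD numeros (i + 1) 0 - PySem.List.pyGetD numeros i 0)
  bLoop diffs 0 []

-- ===== PRECONDITION & SPEC =====
def Spec_todasSequenciasPulos (numeros : List Int) (out : List String) : Prop := out = todasSequenciasPulos_alt numeros
instance (numeros : List Int) (out : List String) : Decidable (Spec_todasSequenciasPulos numeros out) := by unfold Spec_todasSequenciasPulos; infer_instance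

-- ===== CLAIM (what is proved, stated in full; the proofs are below) =====
def Claim_equal_todasSequenciasPulos : Prop := ∀ (numeros : List Int), Dom_todasSequenciasPulos numeros → Spec_todasSequenciasPulos numeros (todasSequenciasPulos numeros)

-- ===== LEMMAS AND PROOFS =====

-- A's loop body as a function of the difference alone
def stepD (s : String × List String × Int) (d : Int) : String × List String × Int :=
  if d = 1 then (s.1, s.2.1, s.2.2 + 1)
  else if s.2.2 > 0 then
    ("", s.2.1 ++ [s.1 ++ ("S" ++ PySem.Int.toStr (s.2.2 + 1) ++ "P" ++ PySem.Int.toStr d)], 0)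
  else
    (s.1, s.2.1, 0)

-- A's epilogue
def finA (s : String × List String × Int) : List String :=
  if s.2.2 > 0 then s.2.1 ++ [s.1 ++ ("S" ++ PySem.Int.toStr (s.2.2 + 1))] else s.2.1

-- common mathematical description: result of scanning a diff list with a pending run length
def G : List Int → Int → List String
  | [], tam => if tam > 0 then ["S" ++ PySem.Int.toStr (tam + 1)] else []
  | d :: ds, tam =>
    if d = 1 then G ds (tam + 1)
    else if tam > 0 then ("S" ++ PySem.Int.toStr (tam + 1) ++ "P" ++ PySem.Int.toStr d) :: G ds 0
    else G ds 0

-- leading-run decomposition of a diff list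
def split1 : List Int → Nat × List Int
  | [] => (0, [])
  | d :: ds => if d = 1 then ((split1 ds).1 + 1, (split1 ds).2) else (0, d :: ds)

def Grest (t : Int) : List Int → List String
  | [] => if t > 0 then ["S" ++ PySem.Int.toStr (t + 1)] else []
  | e :: es => if t > 0 then ("S" ++ PySem.Int.toStr (t + 1) ++ "P" ++ PySem.Int.toStr e) :: G es 0 else G es 0

theorem stepA_eq (numeros : List Int) (s : String × List String × Int) (n : Int) :
    stepA numeros s n = stepD s (PySem.List.pyGetD numeros (n + 1) 0 - PySem.List.pyGetD numeros n 0) := by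
  by_cases h : PySem.List.pyGetD numeros n 0 + 1 = PySem.List.pyGetD numeros (n + 1) 0
  · simp [stepA, stepD, h, show PySem.List.pyGetD numeros (n + 1) 0 - PySem.List.pyGetD numeros n 0 = 1 by omega]
  · simp [stepA, stepD, h, show ¬(PySem.List.pyGetD numeros (n + 1) 0 - PySem.List.pyGetD numeros n 0 = 1) by omega]

theorem foldA_G : ∀ (ds : List Int) (todas : List String) (tam : Int), 0 ≤ tam →
    finA (ds.foldl stepD ("", todas, tam)) = todas ++ G ds tam := by
  intro ds
  induction ds with
  | nil =>
    intro todas tam _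
    by_cases h : tam > 0 <;> simp [finA, G, h, String.empty_append]
  | cons d ds ih =>
    intro todas tam htam
    by_cases h1 : d = 1
    · simpa [stepD, h1, G] using ih todas (tam + 1) (by omega)
    · by_cases h2 : tam > 0
      · have := ih (todas ++ ["" ++ ("S" ++ PySem.Int.toStr (tam + 1) ++ "P" ++ PySem.Int.toStr d)]) 0 le_rfl
        simp [stepD, h1, h2, G, String.empty_append] at this ⊢
        simpa using this
      · simpa [stepD, h1, h2, G] using ih todas 0 le_rfl

theorem bScan_split (diffs : List Int) : ∀ j : Nat,
    bScan diffs j = j + (split1 (diffs.drop j)).1 ∧ diffs.drop (bScan diffs j) = (split1 (diffs.drop j)).2 := by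
  intro j
  fun_induction bScan diffs j with
  | case1 j h ih =>
    have hdrop : diffs.drop j = diffs[j] :: diffs.drop (j + 1) := List.drop_eq_getElem_cons h.1
    have hget : diffs[j] = 1 := by
      have := List.getD_eq_getElem diffs 0 h.1
      rw [← this]; exact h.2
    rw [hdrop, hget]
    refine ⟨?_, ?_⟩
    · have h1 : (split1 ((1:Int) :: diffs.drop (j+1))).1 = (split1 (diffs.drop (j+1))).1 + 1 := by
        simp [split1]
      rw [h1]; omega
    · have h2 : (split1 ((1:Int) :: diffs.drop (j+1))).2 = (split1 (diffs.drop (j+1))).2 := by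
        simp [split1]
      rw [h2]; exact ih.2
  | case2 j h =>
    by_cases hj : j < diffs.length
    · have h2 : diffs.getD j 0 ≠ 1 := fun hc => h ⟨hj, hc⟩
      have hdrop : diffs.drop j = diffs[j] :: diffs.drop (j + 1) := List.drop_eq_getElem_cons hj
      have hget : diffs.getD j 0 = diffs[j] := List.getD_eq_getElem diffs 0 hj
      have hneq : ¬diffs[j] = 1 := by rw [← hget]; exact h2
      rw [hdrop]
      simp [split1, hneq]
    · have : diffs.drop j = [] := List.drop_eq_nil_of_le (by omega)
      simp [this, split1]

theorem G_split : ∀ (ds : List Int) (tam : Int), 0 ≤ tam →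
    G ds tam = Grest (tam + ((split1 ds).1 : Int)) (split1 ds).2 := by
  intro ds
  induction ds with
  | nil => intro tam _; simp [G, split1, Grest]
  | cons d ds ih =>
    intro tam htam
    by_cases h1 : d = 1
    · have := ih (tam + 1) (by omega)
      simp only [G, split1, h1] at this ⊢
      rw [this]
      push_cast
      ring_nf
    · simp [G, split1, h1, Grest]

theorem bLoop_G (diffs : List Int) : ∀ (i : Nat) (out : List String),
    bLoop diffs i out = out ++ G (diffs.drop i) 0 := by
  intro i out
  fun_induction bLoop diffs i out with
  | case1 i out hi hne ih =>
    have hdrop : diffs.drop i = diffs[i] :: diffs.drop (i + 1) := List.drop_eq_getElem_cons hi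
    have hget : diffs[i] ≠ 1 := by
      rw [← List.getD_eq_getElem diffs 0 hi]; exact hne
    rw [ih, hdrop]
    simp [G, hget]
  | case2 i out hi hone j hjlt ih =>
    have hj_eq : bScan diffs i = j := rfl
    have hone' : diffs.getD i 0 = 1 := by simpa using hone
    obtain ⟨hs1, hs2⟩ := bScan_split diffs i
    rw [hj_eq] at hs1 hs2
    have hr1 : 1 ≤ (split1 (diffs.drop i)).1 := by
      have hdrop : diffs.drop i = diffs[i] :: diffs.drop (i + 1) := List.drop_eq_getElem_cons hi
      have hget : diffs[i] = 1 := by rw [← List.getD_eq_getElem diffs 0 hi]; exact hone'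
      rw [hdrop, hget]; simp [split1]
    rw [ih, G_split (diffs.drop i) 0 le_rfl]
    have hrest : (split1 (diffs.drop i)).2 = diffs[j] :: diffs.drop (j + 1) := by
      rw [← hs2]; exact List.drop_eq_getElem_cons hjlt
    rw [hrest]
    have hgd : diffs.getD j 0 = diffs[j] := List.getD_eq_getElem diffs 0 hjlt
    have harg : ((j : Int) - (i : Int) + 1) = (0 : Int) + ((split1 (diffs.drop i)).1 : Int) + 1 := by
      omega
    simp only [Grest, show (0:Int) + ((split1 (diffs.drop i)).1 : Int) > 0 by omega, if_pos, hgd, harg]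
    simp
  | case3 i out hi hone j hjlt =>
    have hj_eq : bScan diffs i = j := rfl
    have hone' : diffs.getD i 0 = 1 := by simpa using hone
    obtain ⟨hs1, hs2⟩ := bScan_split diffs i
    rw [hj_eq] at hs1 hs2
    have hr1 : 1 ≤ (split1 (diffs.drop i)).1 := by
      have hdrop : diffs.drop i = diffs[i] :: diffs.drop (i + 1) := List.drop_eq_getElem_cons hi
      have hget : diffs[i] = 1 := by rw [← List.getD_eq_getElem diffs 0 hi]; exact hone'
      rw [hdrop, hget]; simp [split1]
    rw [G_split (diffs.drop i) 0 le_rfl]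
    have hrest : (split1 (diffs.drop i)).2 = [] := by
      rw [← hs2]; exact List.drop_eq_nil_of_le (by omega)
    have harg : ((j : Int) - (i : Int) + 1) = (0 : Int) + ((split1 (diffs.drop i)).1 : Int) + 1 := by
      omega
    rw [hrest, harg]
    simp only [Grest, if_pos (show (0:Int) + ((split1 (diffs.drop i)).1 : Int) > 0 by omega)]
  | case4 i out hi =>
    have : diffs.drop i = [] := List.drop_eq_nil_of_le (by omega)
    simp [this, G]

-- ===== VERDICT (by name: the statement is the Claim_ definition above) =====
theorem todasSequenciasPulos_spec : Claim_equal_todasSequenciasPulos := by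
  intro numeros _
  unfold Spec_todasSequenciasPulos todasSequenciasPulos todasSequenciasPulos_alt
  have hstep : stepA numeros = fun s n => stepD s (PySem.List.pyGetD numeros (n + 1) 0 - PySem.List.pyGetD numeros n 0) :=
    funext fun s => funext fun n => stepA_eq numeros s n
  rw [hstep, ← List.foldl_map]
  rw [bLoop_G]
  have := foldA_G ((PySem.List.pyRange 0 (PySem.List.len numeros - 1) 1).map
    (fun i => PySem.List.pyGetD numeros (i + 1) 0 - PySem.List.pyGetD numeros i 0)) [] 0 le_rfl
  simpa [finA] using this
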